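-- pv_equiv track=rewrite | github.com/keith-hall/sublime-xpath | lxml_parser.py | collapseWhitespace
-- ===== SOURCE A (Python) =====
-- def collapseWhitespace(text, maxlen):
--     """Replace tab characters and new line characters with spaces, trim the text and convert multiple spaces into a single space, and optionally truncate the result at maxlen characters."""
--     text = (text or '').strip()[0:maxlen + 1].replace('\n', ' ').replace('\t', ' ')
--     while '  ' in text:
--         text = text.replace('  ', ' ')
--     if maxlen < 0: # a negative maxlen means infinite/no limit
--         return text
--     else:
--         append = ''
--         if len(text) > maxlen:
--             append = '...'
--         return text[0:maxlen - len(append)] + append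
-- ===== SOURCE B (Python) =====
-- def collapseWhitespace(text, maxlen):
--     """Single linear pass: collapse space runs while building the result once."""
--     text = (text or '').strip()[0:maxlen + 1].replace('\n', ' ').replace('\t', ' ')
--     out = []
--     for ch in text:
--         if ch == ' ' and out and out[-1] == ' ':
--             continue
--         out.append(ch)
--     text = ''.join(out)
--     if maxlen < 0:
--         return text
--     if len(text) > maxlen:
--         return text[0:maxlen - 3] + '...'
--     return text
-- ===== Notes on version B (the rewrite author's own statement) =====
-- stated objective: alternative
-- what changed: The multi-pass `while ' ' in text: text = text.replace(' ',' ')` rescan loop is replaced by a single linear accumulator pass that builds the result character by character, skipping a space whenever the last emitted character is already a space; the preamble and truncation arithmetic are unchanged.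
import Mathlib
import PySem

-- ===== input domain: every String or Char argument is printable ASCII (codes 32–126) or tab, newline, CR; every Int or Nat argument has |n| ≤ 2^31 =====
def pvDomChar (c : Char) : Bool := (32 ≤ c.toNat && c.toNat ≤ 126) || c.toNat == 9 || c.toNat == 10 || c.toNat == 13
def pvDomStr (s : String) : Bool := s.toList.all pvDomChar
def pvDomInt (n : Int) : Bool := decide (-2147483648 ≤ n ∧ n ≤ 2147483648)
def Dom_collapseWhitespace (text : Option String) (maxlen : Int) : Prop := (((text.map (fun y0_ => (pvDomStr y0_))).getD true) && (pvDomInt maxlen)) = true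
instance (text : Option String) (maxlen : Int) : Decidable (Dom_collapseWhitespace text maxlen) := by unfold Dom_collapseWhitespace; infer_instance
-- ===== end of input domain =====

-- B replaces A's repeated multi-pass replace('  ',' ') rescan loop with a single linear accumulator pass (an alternative single-scan algorithm, not claimed faster); equivalence of the return values is proved on the whole domain.


-- ===== PORT A =====
-- the `while '  ' in text` loop, with fuel (length + 1 suffices: every pass with '  ' present strictly shrinks the string)
def pvALoop : Nat → List Char → List Char
  | 0, l => l
  | fuel+1, l =>
      if PySem.Chars.isIn [' ', ' '] l then pvALoop fuel (PySem.Chars.replace l [' ', ' '] [' ']) else l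

def collapseWhitespace (text : Option String) (maxlen : Int) : String :=
  -- text = (text or '').strip()[0:maxlen+1].replace('\n',' ').replace('\t',' ')
  let cs := (text.getD "").toList
  let t1 := PySem.Chars.replace (PySem.Chars.replace
              (PySem.Chars.slice (PySem.Chars.strip cs) (some 0) (some (maxlen + 1)))
              ['\n'] [' ']) ['\t'] [' ']
  let t := pvALoop (t1.length + 1) t1
  if maxlen < 0 then String.ofList t
  else
    let append : List Char := if (t.length : Int) > maxlen then "...".toList else []
    String.ofList (PySem.Chars.slice t (some 0) (some (maxlen - (append.length : Int))) ++ append)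

-- ===== PORT B =====
def collapseWhitespace_alt (text : Option String) (maxlen : Int) : String :=
  let cs := (text.getD "").toList
  let t1 := PySem.Chars.replace (PySem.Chars.replace
              (PySem.Chars.slice (PySem.Chars.strip cs) (some 0) (some (maxlen + 1)))
              ['\n'] [' ']) ['\t'] [' ']
  -- single pass: skip a space when the last emitted character is a space
  let t := t1.foldl (fun out ch =>
      if ch = ' ' ∧ out ≠ [] ∧ out.getLast? = some ' ' then out else out ++ [ch]) []
  if maxlen < 0 then String.ofList t
  else if (t.length : Int) > maxlen then
    String.ofList (PySem.Chars.slice t (some 0) (some (maxlen - 3)) ++ "...".toList)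
  else String.ofList t

-- ===== PRECONDITION & SPEC =====
def Spec_collapseWhitespace (text : Option String) (maxlen : Int) (out : String) : Prop := out = collapseWhitespace_alt text maxlen
instance (text : Option String) (maxlen : Int) (out : String) : Decidable (Spec_collapseWhitespace text maxlen out) := by unfold Spec_collapseWhitespace; infer_instance

-- ===== CLAIM (what is proved, stated in full; the proofs are below) =====
def Claim_equal_collapseWhitespace : Prop := ∀ (text : Option String) (maxlen : Int), Dom_collapseWhitespace text maxlen → Spec_collapseWhitespace text maxlen (collapseWhitespace text maxlen)

-- ===== LEMMAS AND PROOFS =====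

-- one pass of text.replace('  ', ' ')
def pvRep : List Char → List Char
  | [] => []
  | [c] => [c]
  | c :: d :: t => if c = ' ' ∧ d = ' ' then ' ' :: pvRep t else c :: pvRep (d :: t)

-- the collapsed normal form, carrying "previous emitted char is a space"
def pvCol : Bool → List Char → List Char
  | _, [] => []
  | b, c :: t => if c = ' ' ∧ b = true then pvCol true t else c :: pvCol (c = ' ') t

theorem pvCol_cons (b : Bool) (c : Char) (t : List Char) :
    pvCol b (c :: t) = if c = ' ' ∧ b = true then pvCol true t else c :: pvCol (decide (c = ' ')) t := rfl

theorem pvRep_eq_go (fuel : Nat) : ∀ (l acc : List Char), l.length ≤ fuel →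
    PySem.Chars.replace.go [' ', ' '] [' '] fuel l acc = acc.reverse ++ pvRep l := by
  induction fuel with
  | zero =>
    intro l acc h
    have : l = [] := List.eq_nil_of_length_eq_zero (Nat.le_zero.mp h)
    subst this
    simp [PySem.Chars.replace.go, pvRep]
  | succ fuel ih =>
    intro l acc h
    match l with
    | [] => simp [PySem.Chars.replace.go, pvRep]
    | [c] =>
      have hpre : [' ', ' '].isPrefixOf [c] = false := by
        simp [List.isPrefixOf]
      rw [PySem.Chars.replace.go]
      simp only [hpre]
      rw [ih [] (c :: acc) (by simp)]
      simp [pvRep]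
    | c :: d :: t =>
      rw [PySem.Chars.replace.go]
      by_cases hcd : c = ' ' ∧ d = ' '
      · obtain ⟨hc, hd⟩ := hcd
        subst hc; subst hd
        have hpre : [' ', ' '].isPrefixOf (' ' :: ' ' :: t) = true := by
          simp [List.isPrefixOf]
        simp only [hpre, if_true]
        rw [show (List.drop [' ', ' '].length (' ' :: ' ' :: t)) = t from rfl]
        rw [ih t ([' '].reverse ++ acc) (by simp at h ⊢; omega)]
        simp [pvRep]
      · have hpre : [' ', ' '].isPrefixOf (c :: d :: t) = false := by
          apply Bool.eq_false_iff.mpr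
          intro hp
          rcases List.isPrefixOf_iff_prefix.mp hp with ⟨r, hr⟩
          injection hr with h1 h2
          injection h2 with h3 h4
          exact hcd ⟨h1.symm, h3.symm⟩
        simp only [hpre, Bool.false_eq_true, if_false]
        rw [ih (d :: t) (c :: acc) (by simp at h ⊢; omega)]
        simp [pvRep, hcd]

theorem pvRep_eq_replace (l : List Char) :
    PySem.Chars.replace l [' ', ' '] [' '] = pvRep l := by
  rw [PySem.Chars.replace]
  simp only [List.isEmpty_cons, Bool.false_eq_true, if_false]
  rw [pvRep_eq_go l.length l [] (le_refl _)]
  simp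

theorem pvRep_length_le : ∀ l : List Char, (pvRep l).length ≤ l.length := by
  intro l
  induction l using pvRep.induct with
  | case1 => simp [pvRep]
  | case2 c => simp [pvRep]
  | case3 c d t h ih => simp [pvRep, h]; omega
  | case4 c d t h ih => simp [pvRep, h] at ih ⊢; omega

theorem pvRep_length_lt : ∀ l : List Char, [' ', ' '] <:+: l → (pvRep l).length < l.length := by
  intro l
  induction l using pvRep.induct with
  | case1 => intro h; simp at h
  | case2 c =>
    intro h
    have := h.length_le; simp at this
  | case3 c d t h ih =>
    intro _
    obtain ⟨hc, hd⟩ := h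
    have := pvRep_length_le t
    simp only [pvRep, hc, hd, and_self, if_true, List.length_cons]
    omega
  | case4 c d t h ih =>
    intro hin
    rcases List.infix_cons_iff.mp hin with hpre | hinf
    · exfalso
      rcases hpre with ⟨r, hr⟩
      injection hr with h1 h2
      injection h2 with h3 h4
      exact h ⟨h1.symm, h3.symm⟩
    · have := ih hinf
      simp only [pvRep, if_neg h, List.length_cons] at this ⊢
      omega

theorem pvCol_rep (l : List Char) : ∀ b, pvCol b (pvRep l) = pvCol b l := by
  induction l using pvRep.induct with
  | case1 => intro b; simp [pvRep]
  | case2 c => intro b; simp [pvRep]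
  | case3 c d t h ih =>
    obtain ⟨hc, hd⟩ := h
    subst hc; subst hd
    intro b
    cases b
    · simp [pvRep, pvCol, ih]
    · simp [pvRep, pvCol, ih]
  | case4 c d t h ih =>
    intro b
    rw [show pvRep (c :: d :: t) = c :: pvRep (d :: t) by rw [pvRep, if_neg h]]
    rw [pvCol_cons, pvCol_cons b c (d :: t)]
    by_cases hcb : c = ' ' ∧ b = true
    · rw [if_pos hcb, if_pos hcb]
      exact ih true
    · rw [if_neg hcb, if_neg hcb, ih]

theorem pvCol_fixed : ∀ l : List Char, ¬ ([' ', ' '] <:+: l) →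
    pvCol false l = l ∧ (l.head? ≠ some ' ' → pvCol true l = l) := by
  intro l
  induction l with
  | nil => intro _; simp [pvCol]
  | cons c t ih =>
    intro hn
    have hnt : ¬ ([' ', ' '] <:+: t) := fun h => hn (List.infix_cons_iff.mpr (Or.inr h))
    obtain ⟨h1, h2⟩ := ih hnt
    constructor
    · simp only [pvCol]
      by_cases hc : c = ' '
      · subst hc
        have hhd : t.head? ≠ some ' ' := by
          intro hh
          apply hn
          apply List.infix_cons_iff.mpr
          left
          cases t with
          | nil => simp at hh
          | cons x t' =>
            simp at hh
            subst hh
            exact ⟨t', rfl⟩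
        simp [h2 hhd]
      · simp [hc, h1]
    · intro hhd
      simp only [pvCol]
      have hc : ¬ (c = ' ') := by
        intro hc; subst hc; simp at hhd
      rw [if_neg (by simp [hc])]
      by_cases hceq : c = ' '
      · exact absurd hceq hc
      · simp [hceq, h1]

theorem pvALoop_eq_col (fuel : Nat) : ∀ l : List Char, l.length ≤ fuel →
    pvALoop fuel l = pvCol false l := by
  induction fuel with
  | zero =>
    intro l h
    have : l = [] := List.eq_nil_of_length_eq_zero (Nat.le_zero.mp h)
    subst this
    simp [pvALoop, pvCol]
  | succ fuel ih =>
    intro l h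
    rw [pvALoop]
    by_cases hin : PySem.Chars.isIn [' ', ' '] l = true
    · rw [if_pos hin, pvRep_eq_replace]
      have hinf : [' ', ' '] <:+: l := (PySem.Chars.isIn_iff_infix _ _).mp hin
      have hlt := pvRep_length_lt l hinf
      rw [ih (pvRep l) (by omega)]
      exact pvCol_rep l false
    · rw [if_neg hin]
      have : ¬ ([' ', ' '] <:+: l) := by
        intro hc
        exact hin ((PySem.Chars.isIn_iff_infix _ _).mpr hc)
      exact ((pvCol_fixed l this).1).symm

theorem pvFoldl_eq_col : ∀ (l out : List Char),
    l.foldl (fun out ch =>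
      if ch = ' ' ∧ out ≠ [] ∧ out.getLast? = some ' ' then out else out ++ [ch]) out
    = out ++ pvCol (out.getLast? == some ' ') l := by
  intro l
  induction l with
  | nil => intro out; simp [pvCol]
  | cons c t ih =>
    intro out
    simp only [List.foldl_cons]
    by_cases hc : c = ' ' ∧ out ≠ [] ∧ out.getLast? = some ' '
    · rw [if_pos hc, ih, pvCol_cons, if_pos ⟨hc.1, by simp [hc.2.2]⟩,
        show (out.getLast? == some ' ') = true by simp [hc.2.2]]
    · rw [if_neg hc, ih, pvCol_cons]
      rw [show (out ++ [c]).getLast? = some c from by simp]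
      by_cases hceq : c = ' '
      · subst hceq
        have hlf : (out.getLast? == some ' ') = false := by
          apply Bool.eq_false_iff.mpr
          intro hx
          apply hc
          refine ⟨rfl, ?_, by simpa using hx⟩
          intro hnil; subst hnil; simp at hx
        rw [hlf]
        simp
      · have h2 : ¬ (c = ' ' ∧ (out.getLast? == some ' ') = true) := fun h => hceq h.1
        rw [if_neg h2]
        have hcd : decide (c = ' ') = false := by simpa using hceq
        have hcl : (some c == some ' ') = false := by simpa using hceq
        rw [hcd, hcl]
        simp

theorem pvT_eq (t1 : List Char) :
    pvALoop (t1.length + 1) t1 =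
    t1.foldl (fun out ch =>
      if ch = ' ' ∧ out ≠ [] ∧ out.getLast? = some ' ' then out else out ++ [ch]) [] := by
  rw [pvALoop_eq_col (t1.length + 1) t1 (by omega), pvFoldl_eq_col t1 []]
  simp

-- ===== VERDICT (by name: the statement is the Claim_ definition above) =====
theorem collapseWhitespace_spec : Claim_equal_collapseWhitespace := by
  intro text maxlen _
  unfold Spec_collapseWhitespace collapseWhitespace collapseWhitespace_alt
  simp only []
  rw [pvT_eq]
  set t := (PySem.Chars.replace (PySem.Chars.replace
      (PySem.Chars.slice (PySem.Chars.strip (text.getD "").toList) (some 0) (some (maxlen + 1)))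
      ['\n'] [' ']) ['\t'] [' ']).foldl (fun out ch =>
      if ch = ' ' ∧ out ≠ [] ∧ out.getLast? = some ' ' then out else out ++ [ch]) [] with ht
  by_cases hneg : maxlen < 0
  · simp [hneg]
  · simp only [if_neg hneg]
    by_cases hlen : (t.length : Int) > maxlen
    · simp [hlen]
    · simp only [hlen, if_false]
      have h0 : (0 : Int) ≤ maxlen := by omega
      congr 1
      have : PySem.Chars.slice t (some 0) (some (maxlen - ((0:Nat) : Int))) = t := by
        simp only [Nat.cast_zero, sub_zero]
        rw [show PySem.Chars.slice t (some 0) (some maxlen) = PySem.List.slice t (some 0) (some maxlen) from rfl]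
        rw [PySem.List.slice_zero_start, PySem.List.slice_to _ h0]
        apply List.take_of_length_le
        omega
      simpa using this
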